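-- pv_equiv track=rewrite | github.com/chera-mihiretu/Leet-Preparation | Matrix_Summation_Of_Citadel.py | solution
-- ===== SOURCE A (Python) =====
-- def solution(nums):
--     N = len(nums)
--     M = len(nums[0])
--     answer = [[0 for _ in range(M)] for __ in range(N)]
--     for i in range(N):
--
--         for j in range(M):
--             if i + 1 < N:
--                 answer[i + 1][j] -= nums[i][j]
--             if j + 1 < M:
--                 answer[i][j + 1] -= nums[i][j]
--             if i + 1 < N and j + 1 < M:
--                 answer[i + 1][j + 1] += nums[i][j]
--     for i in range(N):
--
--         for j in range(M):
--             answer[i][j] += nums[i][j]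
--     return answer
-- ===== SOURCE B (Python) =====
-- def solution(nums):
--     N = len(nums)
--     M = len(nums[0])
--     return [
--         [
--             nums[i][j]
--             - (nums[i - 1][j] if i > 0 else 0)
--             - (nums[i][j - 1] if j > 0 else 0)
--             + (nums[i - 1][j - 1] if i > 0 and j > 0 else 0)
--             for j in range(M)
--         ]
--         for i in range(N)
--     ]
-- ===== Notes on version B (the rewrite author's own statement) =====
-- stated objective: simpler
-- what changed: Replaces A's scatter approach (zero-init answer matrix, a pass pushing -/-/+ contributions into the three forward neighbour cells, then a second pass adding nums back in) by a single gather pass that builds each answer cell directly from nums[i][j] minus its upper and left neighbours plus the diagonal, with out-of-bounds neighbours as 0.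
import Mathlib
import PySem

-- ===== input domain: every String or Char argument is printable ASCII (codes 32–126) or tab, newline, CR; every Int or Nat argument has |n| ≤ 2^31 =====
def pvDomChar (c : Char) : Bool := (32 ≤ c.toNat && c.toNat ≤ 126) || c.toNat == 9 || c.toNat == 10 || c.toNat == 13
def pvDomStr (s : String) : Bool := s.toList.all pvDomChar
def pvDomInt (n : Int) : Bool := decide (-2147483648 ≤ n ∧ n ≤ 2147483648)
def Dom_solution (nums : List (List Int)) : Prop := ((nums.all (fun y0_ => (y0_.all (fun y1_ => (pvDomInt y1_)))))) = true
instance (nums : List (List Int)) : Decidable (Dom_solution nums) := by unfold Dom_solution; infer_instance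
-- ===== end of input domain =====

-- B replaces A's two scatter/add passes into a mutable zero matrix by one gather pass that
-- reads each cell's up/left/diagonal neighbours directly (objective: simpler).

-- shared read helper: nums[i][j] (total form; all reads are in bounds on Pre_)
def pvGet2 (m : List (List Int)) (i j : Nat) : Int := (m.getD i []).getD j 0

-- ===== PORT A =====
-- answer[i][j] f= v  (in-place update of one cell)
def pvMod2 (m : List (List Int)) (i j : Nat) (f : Int → Int) : List (List Int) :=
  m.modify i (fun r => r.modify j f)

-- body of A's first (scatter) double loop, for fixed i, state = answer, argument j
def pvScatterBody (nums : List (List Int)) (N M i : Nat) (ans : List (List Int)) (j : Nat) :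
    List (List Int) :=
  let ans := if i + 1 < N then pvMod2 ans (i+1) j (fun x => x - pvGet2 nums i j) else ans
  let ans := if j + 1 < M then pvMod2 ans i (j+1) (fun x => x - pvGet2 nums i j) else ans
  if i + 1 < N ∧ j + 1 < M then pvMod2 ans (i+1) (j+1) (fun x => x + pvGet2 nums i j) else ans

def solution (nums : List (List Int)) : List (List Int) :=
  let N := nums.length
  let M := (nums.headD []).length      -- len(nums[0]); Pre_ excludes nums = [] (IndexError)
  let answer := List.replicate N (List.replicate M (0 : Int))
  let answer := (List.range N).foldl
    (fun ans i => (List.range M).foldl (pvScatterBody nums N M i) ans) answer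
  (List.range N).foldl
    (fun ans i => (List.range M).foldl
      (fun ans j => pvMod2 ans i j (fun x => x + pvGet2 nums i j)) ans) answer

-- ===== PORT B =====
def solution_alt (nums : List (List Int)) : List (List Int) :=
  let N := nums.length
  let M := (nums.headD []).length      -- len(nums[0]); raises as in A on nums = []
  (List.range N).map (fun i => (List.range M).map (fun j =>
    pvGet2 nums i j
      - (if 0 < i then pvGet2 nums (i-1) j else 0)
      - (if 0 < j then pvGet2 nums i (j-1) else 0)
      + (if 0 < i ∧ 0 < j then pvGet2 nums (i-1) (j-1) else 0)))

-- ===== PRECONDITION & SPEC =====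
-- Pre_ excludes exactly the inputs where Python A raises IndexError: the empty matrix
-- (nums[0]) and matrices with a row shorter than the first row (nums[i][j] for j < M).
def Pre_solution (nums : List (List Int)) : Prop :=
  nums ≠ [] ∧ ∀ row ∈ nums, (nums.headD []).length ≤ row.length

instance (nums : List (List Int)) : Decidable (Pre_solution nums) := by
  unfold Pre_solution; infer_instance

def pvWitness_solution : List (List Int) := [[1, 2], [3, 4]]

def Spec_solution (nums : List (List Int)) (out : List (List Int)) : Prop := out = solution_alt nums
instance (nums : List (List Int)) (out : List (List Int)) : Decidable (Spec_solution nums out) := by unfold Spec_solution; infer_instance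

-- ===== CLAIM (what is proved, stated in full; the proofs are below) =====
def Claim_equal_solution : Prop := ∀ (nums : List (List Int)), Dom_solution nums → Pre_solution nums → Spec_solution nums (solution nums)

-- ===== LEMMAS AND PROOFS =====

-- the answer matrix keeps shape N × M throughout
def pvShape (N M : Nat) (m : List (List Int)) : Prop :=
  m.length = N ∧ ∀ (k : Nat) (h : k < m.length), m[k].length = M

theorem pvShape_mod2 {N M : Nat} {m : List (List Int)} (i j : Nat) (f : Int → Int)
    (h : pvShape N M m) : pvShape N M (pvMod2 m i j f) := by
  obtain ⟨h1, h2⟩ := h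
  refine ⟨by simp [pvMod2, h1], ?_⟩
  intro k hk
  simp only [pvMod2] at hk ⊢
  rw [List.getElem_modify]
  split_ifs with hik
  · simp only [List.length_modify]
    exact h2 k (by simpa using hk)
  · exact h2 k (by simpa using hk)

theorem pvGet2_mod2 {N M : Nat} {m : List (List Int)} (h : pvShape N M m)
    (i j a b : Nat) (f : Int → Int) (ha : a < N) (hb : b < M) :
    pvGet2 (pvMod2 m i j f) a b =
      if a = i ∧ b = j ∧ i < N ∧ j < M then f (pvGet2 m a b) else pvGet2 m a b := by
  obtain ⟨h1, h2⟩ := h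
  have haL : a < m.length := h1 ▸ ha
  have hbL : b < m[a].length := (h2 a haL) ▸ hb
  have haux : pvGet2 m a b = m[a][b] := by
    simp [pvGet2, List.getD_eq_getElem?_getD, List.getElem?_eq_getElem haL,
      List.getElem?_eq_getElem hbL]
  rw [haux]
  simp only [pvGet2, pvMod2, List.getD_eq_getElem?_getD, List.getElem?_modify,
    List.getElem?_eq_getElem haL]
  by_cases hai : i = a
  · subst hai
    simp only [if_pos rfl, Option.map_some, Option.getD_some, List.getElem?_modify,
      List.getElem?_eq_getElem hbL]
    by_cases hbj : j = b
    · subst hbj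
      simp [ha, hb, List.getElem?_eq_getElem hbL]
    · have hbj' : ¬(b = j) := fun hh => hbj hh.symm
      simp [hbj, hbj', List.getElem?_eq_getElem hbL]
  · have hai' : ¬(a = i) := fun hh => hai hh.symm
    simp [hai, hai', List.getElem?_eq_getElem haL, List.getElem?_eq_getElem hbL]

-- a fold of additive cell updates adds the per-iteration contributions
theorem pvFoldAdd {N M : Nat} (F : List (List Int) → Nat → List (List Int)) (c : Nat → Int)
    (a b : Nat) (L : List Nat) :
    ∀ (m : List (List Int)),
      (∀ m' j, j ∈ L → pvShape N M m' → pvShape N M (F m' j)) →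
      (∀ m' j, j ∈ L → pvShape N M m' → pvGet2 (F m' j) a b = pvGet2 m' a b + c j) →
      pvShape N M m →
      pvShape N M (L.foldl F m) ∧
        pvGet2 (L.foldl F m) a b = pvGet2 m a b + (L.map c).sum := by
  induction L with
  | nil => intro m _ _ hm; simpa using hm
  | cons x L ih =>
    intro m hs hg hm
    have hsx := hs m x (by simp) hm
    have := ih (F m x) (fun m' j hj => hs m' j (by simp [hj]))
      (fun m' j hj => hg m' j (by simp [hj])) hsx
    refine ⟨by simpa using this.1, ?_⟩
    simp only [List.foldl_cons, List.map_cons, List.sum_cons]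
    rw [this.2, hg m x (by simp) hm]
    ring

theorem pvSumIte (n c : Nat) (v : Int) :
    ((List.range n).map (fun k => if k = c then v else 0)).sum = if c < n then v else 0 := by
  induction n with
  | zero => simp
  | succ n ih =>
    rw [List.range_succ]
    simp only [List.map_append, List.sum_append, ih, List.map_cons, List.map_nil,
      List.sum_cons, List.sum_nil, add_zero]
    split_ifs <;> omega

theorem pvSumAdd3 (L : List Nat) (f g h : Nat → Int) :
    (L.map (fun k => f k + g k + h k)).sum = (L.map f).sum + (L.map g).sum + (L.map h).sum := by
  induction L with
  | nil => simp
  | cons x L ih => simp [ih]; ring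

-- contribution of scatter iteration (i, j) to cell (a, b)
def pvC (nums : List (List Int)) (N M i j a b : Nat) : Int :=
  (if i+1 < N ∧ a = i+1 ∧ b = j then -(pvGet2 nums i j) else 0)
  + (if j+1 < M ∧ a = i ∧ b = j+1 then -(pvGet2 nums i j) else 0)
  + (if i+1 < N ∧ j+1 < M ∧ a = i+1 ∧ b = j+1 then pvGet2 nums i j else 0)

theorem pvScatter_get {N M : Nat} (nums : List (List Int)) (i j a b : Nat)
    {m : List (List Int)} (hm : pvShape N M m) (ha : a < N) (hb : b < M) :
    pvGet2 (pvScatterBody nums N M i m j) a b = pvGet2 m a b + pvC nums N M i j a b := by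
  unfold pvScatterBody pvC
  set v := pvGet2 nums i j with hv
  by_cases h1 : i + 1 < N <;> by_cases h2 : j + 1 < M <;>
    simp only [h1, h2, if_true, if_false, and_true, and_false, true_and, false_and,
      if_pos, ite_true, ite_false, and_self] <;>
  · first
    | (rw [pvGet2_mod2 (pvShape_mod2 _ _ _ (pvShape_mod2 _ _ _ hm)) _ _ _ _ _ ha hb,
        pvGet2_mod2 (pvShape_mod2 _ _ _ hm) _ _ _ _ _ ha hb,
        pvGet2_mod2 hm _ _ _ _ _ ha hb]
       split_ifs <;> first | ring1 | (exfalso; omega))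
    | (rw [pvGet2_mod2 (pvShape_mod2 _ _ _ hm) _ _ _ _ _ ha hb,
        pvGet2_mod2 hm _ _ _ _ _ ha hb]
       split_ifs <;> first | ring1 | (exfalso; omega))
    | (rw [pvGet2_mod2 hm _ _ _ _ _ ha hb]
       split_ifs <;> first | ring1 | (exfalso; omega))
    | (split_ifs <;> first | ring1 | (exfalso; omega))
    | ring1
    | simp

theorem pvScatter_shape {N M : Nat} (nums : List (List Int)) (i j : Nat)
    {m : List (List Int)} (hm : pvShape N M m) :
    pvShape N M (pvScatterBody nums N M i m j) := by
  unfold pvScatterBody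
  split_ifs <;> repeat first | assumption | apply pvShape_mod2

-- the final per-cell contribution of A's scatter pass
def pvS (nums : List (List Int)) (a b : Nat) : Int :=
  (if 1 ≤ a then -(pvGet2 nums (a-1) b) else 0)
  + (if 1 ≤ b then -(pvGet2 nums a (b-1)) else 0)
  + (if 1 ≤ a ∧ 1 ≤ b then pvGet2 nums (a-1) (b-1) else 0)

theorem pvSumInner (nums : List (List Int)) (N M i a b : Nat) (hb : b < M) :
    ((List.range M).map (fun j => pvC nums N M i j a b)).sum =
      (if i+1 < N ∧ a = i+1 then -(pvGet2 nums i b) else 0)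
      + (if a = i ∧ 1 ≤ b then -(pvGet2 nums i (b-1)) else 0)
      + (if i+1 < N ∧ a = i+1 ∧ 1 ≤ b then pvGet2 nums i (b-1)  else 0) := by
  unfold pvC
  rw [pvSumAdd3]
  have e1 : ∀ j ∈ List.range M,
      (if i+1 < N ∧ a = i+1 ∧ b = j then -(pvGet2 nums i j) else 0)
        = (if j = b then (if i+1 < N ∧ a = i+1 then -(pvGet2 nums i b) else 0) else 0) := by
    intro j _
    split_ifs <;> first
      | rfl
      | (exfalso; omega)
      | (have hje : j = b := (by omega); rw [hje])
  have e2 : ∀ j ∈ List.range M,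
      (if j+1 < M ∧ a = i ∧ b = j+1 then -(pvGet2 nums i j) else 0)
        = (if j = b - 1 then (if a = i ∧ 1 ≤ b then -(pvGet2 nums i (b-1)) else 0) else 0) := by
    intro j _
    split_ifs <;> first
      | rfl
      | (exfalso; omega)
      | (have hje : j = b - 1 := (by omega); rw [hje])
  have e3 : ∀ j ∈ List.range M,
      (if i+1 < N ∧ j+1 < M ∧ a = i+1 ∧ b = j+1 then pvGet2 nums i j else 0)
        = (if j = b - 1 then (if i+1 < N ∧ a = i+1 ∧ 1 ≤ b then pvGet2 nums i (b-1) else 0) else 0) := by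
    intro j _
    split_ifs <;> first
      | rfl
      | (exfalso; omega)
      | (have hje : j = b - 1 := (by omega); rw [hje])
  rw [List.map_congr_left e1, List.map_congr_left e2, List.map_congr_left e3,
    pvSumIte, pvSumIte, pvSumIte, if_pos hb, if_pos (by omega : b - 1 < M),
    if_pos (by omega : b - 1 < M)]

theorem pvSumOuter (nums : List (List Int)) (N M a b : Nat) (ha : a < N) (hb : b < M) :
    ((List.range N).map
        (fun i => ((List.range M).map (fun j => pvC nums N M i j a b)).sum)).sum
      = pvS nums a b := by
  have einner : ∀ i ∈ List.range N,
      ((List.range M).map (fun j => pvC nums N M i j a b)).sum =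
        ((if i+1 < N ∧ a = i+1 then -(pvGet2 nums i b) else 0)
          + (if a = i ∧ 1 ≤ b then -(pvGet2 nums i (b-1)) else 0)
          + (if i+1 < N ∧ a = i+1 ∧ 1 ≤ b then pvGet2 nums i (b-1) else 0)) :=
    fun i _ => pvSumInner nums N M i a b hb
  rw [List.map_congr_left einner, pvSumAdd3]
  have e1 : ∀ i ∈ List.range N,
      (if i+1 < N ∧ a = i+1 then -(pvGet2 nums i b) else 0)
        = (if i = a - 1 then (if 1 ≤ a then -(pvGet2 nums (a-1) b) else 0) else 0) := by
    intro i _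
    split_ifs <;> first
      | rfl
      | (exfalso; omega)
      | (have hie : i = a - 1 := (by omega); rw [hie])
  have e2 : ∀ i ∈ List.range N,
      (if a = i ∧ 1 ≤ b then -(pvGet2 nums i (b-1)) else 0)
        = (if i = a then (if 1 ≤ b then -(pvGet2 nums a (b-1)) else 0) else 0) := by
    intro i _
    split_ifs <;> first
      | rfl
      | (exfalso; omega)
      | (have hie : i = a := (by omega); rw [hie])
  have e3 : ∀ i ∈ List.range N,
      (if i+1 < N ∧ a = i+1 ∧ 1 ≤ b then pvGet2 nums i (b-1) else 0)
        = (if i = a - 1 then (if 1 ≤ a ∧ 1 ≤ b then pvGet2 nums (a-1) (b-1) else 0) else 0) := by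
    intro i _
    split_ifs <;> first
      | rfl
      | (exfalso; omega)
      | (have hie : i = a - 1 := (by omega); rw [hie])
  rw [List.map_congr_left e1, List.map_congr_left e2, List.map_congr_left e3,
    pvSumIte, pvSumIte, pvSumIte, if_pos ha, if_pos (by omega : a - 1 < N),
    if_pos (by omega : a - 1 < N)]
  rfl

theorem pvScatterFold_get {N M : Nat} (nums : List (List Int)) (a b : Nat)
    {m : List (List Int)} (hm : pvShape N M m) (ha : a < N) (hb : b < M) :
    pvShape N M ((List.range N).foldl
        (fun ans i => (List.range M).foldl (pvScatterBody nums N M i) ans) m) ∧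
      pvGet2 ((List.range N).foldl
        (fun ans i => (List.range M).foldl (pvScatterBody nums N M i) ans) m) a b
        = pvGet2 m a b + pvS nums a b := by
  have hinner : ∀ (i : Nat) (m' : List (List Int)), pvShape N M m' →
      pvShape N M ((List.range M).foldl (pvScatterBody nums N M i) m') ∧
        pvGet2 ((List.range M).foldl (pvScatterBody nums N M i) m') a b
          = pvGet2 m' a b + ((List.range M).map (fun j => pvC nums N M i j a b)).sum := by
    intro i m' hm'
    exact pvFoldAdd (pvScatterBody nums N M i) (fun j => pvC nums N M i j a b) a b
      (List.range M) m'
      (fun m'' j _ h => pvScatter_shape nums i j h)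
      (fun m'' j _ h => pvScatter_get nums i j a b h ha hb) hm'
  have := pvFoldAdd (fun ans i => (List.range M).foldl (pvScatterBody nums N M i) ans)
    (fun i => ((List.range M).map (fun j => pvC nums N M i j a b)).sum) a b
    (List.range N) m
    (fun m' i _ h => (hinner i m' h).1)
    (fun m' i _ h => (hinner i m' h).2) hm
  exact ⟨this.1, by rw [this.2, pvSumOuter nums N M a b ha hb]⟩

theorem pvAddFold_get {N M : Nat} (nums : List (List Int)) (a b : Nat)
    {m : List (List Int)} (hm : pvShape N M m) (ha : a < N) (hb : b < M) :
    pvShape N M ((List.range N).foldl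
        (fun ans i => (List.range M).foldl
          (fun ans j => pvMod2 ans i j (fun x => x + pvGet2 nums i j)) ans) m) ∧
      pvGet2 ((List.range N).foldl
        (fun ans i => (List.range M).foldl
          (fun ans j => pvMod2 ans i j (fun x => x + pvGet2 nums i j)) ans) m) a b
        = pvGet2 m a b + pvGet2 nums a b := by
  have hstep : ∀ (i : Nat) (m' : List (List Int)) (j : Nat), pvShape N M m' →
      pvGet2 (pvMod2 m' i j (fun x => x + pvGet2 nums i j)) a b
        = pvGet2 m' a b + (if a = i ∧ b = j ∧ i < N ∧ j < M then pvGet2 nums i j else 0) := by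
    intro i m' j hm'
    rw [pvGet2_mod2 hm' i j a b _ ha hb]
    split_ifs <;> first | ring1 | (exfalso; omega)
  have hinner : ∀ (i : Nat) (m' : List (List Int)), pvShape N M m' →
      pvShape N M ((List.range M).foldl
        (fun ans j => pvMod2 ans i j (fun x => x + pvGet2 nums i j)) m') ∧
        pvGet2 ((List.range M).foldl
          (fun ans j => pvMod2 ans i j (fun x => x + pvGet2 nums i j)) m') a b
          = pvGet2 m' a b
            + ((List.range M).map
                (fun j => if a = i ∧ b = j ∧ i < N ∧ j < M then pvGet2 nums i j else 0)).sum := by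
    intro i m' hm'
    exact pvFoldAdd _ _ a b (List.range M) m'
      (fun m'' j _ h => pvShape_mod2 i j _ h)
      (fun m'' j _ h => hstep i m'' j h) hm'
  have hisum : ∀ i : Nat,
      ((List.range M).map
          (fun j => if a = i ∧ b = j ∧ i < N ∧ j < M then pvGet2 nums i j else 0)).sum
        = (if i = a then (if a < N then pvGet2 nums a b else 0) else 0) := by
    intro i
    have e : ∀ j ∈ List.range M,
        (if a = i ∧ b = j ∧ i < N ∧ j < M then pvGet2 nums i j else 0)
          = (if j = b then (if i = a then (if a < N then pvGet2 nums a b else 0) else 0) else 0) := by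
      intro j _
      split_ifs <;> first
        | rfl
        | (exfalso; omega)
        | (have h1 : j = b := (by omega); have h2 : i = a := (by omega); rw [h1, h2])
    rw [List.map_congr_left e, pvSumIte, if_pos hb]
  have := pvFoldAdd
    (fun ans i => (List.range M).foldl
      (fun ans j => pvMod2 ans i j (fun x => x + pvGet2 nums i j)) ans)
    (fun i => if i = a then (if a < N then pvGet2 nums a b else 0) else 0) a b
    (List.range N) m
    (fun m' i _ h => (hinner i m' h).1)
    (fun m' i _ h => by rw [(hinner i m' h).2, hisum i]) hm
  refine ⟨this.1, ?_⟩
  rw [this.2, pvSumIte, if_pos ha, if_pos ha]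

theorem pvShape_replicate (N M : Nat) :
    pvShape N M (List.replicate N (List.replicate M (0 : Int))) := by
  refine ⟨by simp, ?_⟩
  intro k hk
  simp [List.getElem_replicate]

theorem pvGet2_replicate (N M a b : Nat) :
    pvGet2 (List.replicate N (List.replicate M (0 : Int))) a b = 0 := by
  by_cases ha : a < N <;> by_cases hb : b < M <;>
    simp [pvGet2, List.getD_eq_getElem?_getD, List.getElem?_replicate, ha, hb]

theorem pvFoldShape {N M : Nat} (L : List Nat) (F : List (List Int) → Nat → List (List Int))
    (hs : ∀ m j, j ∈ L → pvShape N M m → pvShape N M (F m j)) :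
    ∀ {m : List (List Int)}, pvShape N M m → pvShape N M (L.foldl F m) := by
  induction L with
  | nil => intro m hm; simpa using hm
  | cons x L ih =>
    intro m hm
    simpa using ih (fun m' j hj h => hs m' j (by simp [hj]) h) (hs m x (by simp) hm)

theorem pvSolution_char (nums : List (List Int)) :
    pvShape nums.length (nums.headD []).length (solution nums) ∧
      ∀ (a b : Nat), a < nums.length → b < (nums.headD []).length →
        pvGet2 (solution nums) a b = pvGet2 nums a b + pvS nums a b := by
  constructor
  · show pvShape _ _ (solution nums)
    unfold solution
    exact pvFoldShape _ _
      (fun m i _ h => pvFoldShape _ _ (fun m' j _ h' => pvShape_mod2 i j _ h') h)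
      (pvFoldShape _ _
        (fun m i _ h => pvFoldShape _ _ (fun m' j _ h' => pvScatter_shape nums i j h') h)
        (pvShape_replicate _ _))
  · intro a b ha hb
    unfold solution
    rw [(pvAddFold_get nums a b
        (pvScatterFold_get nums a b (pvShape_replicate _ _) ha hb).1 ha hb).2,
      (pvScatterFold_get nums a b (pvShape_replicate _ _) ha hb).2,
      pvGet2_replicate]
    ring

-- ===== VERDICT (by name: the statement is the Claim_ definition above) =====
theorem solution_spec : Claim_equal_solution := by
  intro nums _ _
  show solution nums = solution_alt nums
  obtain ⟨hshape, hget⟩ := pvSolution_char nums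
  simp only [solution_alt]
  apply List.ext_getElem
  · simp [hshape.1]
  · intro a h1 h2
    have haN : a < nums.length := by simpa [hshape.1] using h1
    apply List.ext_getElem
    · simp [hshape.2 a h1, List.getElem_map, List.getElem_range]
    · intro b hb1 hb2
      have hbM : b < (nums.headD []).length := by
        simpa [hshape.2 a h1] using hb1
      have hrow : (solution nums)[a][b] = pvGet2 (solution nums) a b := by
        rw [pvGet2, List.getD_eq_getElem _ _ h1, List.getD_eq_getElem _ _ hb1]
      rw [hrow, hget a b haN hbM]
      simp only [List.getElem_map, List.getElem_range]
      unfold pvS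
      split_ifs <;> first | ring1 | (exfalso; omega)
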